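-- pv_equiv track=rewrite | github.com/Lucid92/projecteuler | python/145.py | is_reversable
-- ===== SOURCE A (Python) =====
-- def get_digits(n):
--     digits = []
--     while n:
--         digits.append(n % 10)
--         n //= 10
--
--     return digits
--
-- def is_reversable(n):
--     digits = get_digits(n)
--
--     carry = 0
--
--     for i in range(len(digits)):
--         v = digits[i] + digits[len(digits) - i - 1]
--         if (v + carry) % 2 == 0:
--             return False
--
--         if v >= 10:
--             carry = 1
--         else:
--             carry = 0
--
--     return True
-- ===== SOURCE B (Python) =====
-- def is_reversable(n):
--     r, m = 0, n
--     while m: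
--         r = r * 10 + m % 10
--         m //= 10
--     s = n + r
--     while s:
--         if s % 2 == 0:
--             return False
--         s //= 10
--     return True
-- ===== Notes on version B (the rewrite author's own statement) =====
-- stated objective: simpler
-- what changed: B actually computes the reversed integer and the real sum n + reverse(n), then scans that sum's digits for parity (using s % 2 per step), replacing A's simulated column-by-column addition with a hand-maintained carry and double indexing into a digit list.
import Mathlib
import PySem

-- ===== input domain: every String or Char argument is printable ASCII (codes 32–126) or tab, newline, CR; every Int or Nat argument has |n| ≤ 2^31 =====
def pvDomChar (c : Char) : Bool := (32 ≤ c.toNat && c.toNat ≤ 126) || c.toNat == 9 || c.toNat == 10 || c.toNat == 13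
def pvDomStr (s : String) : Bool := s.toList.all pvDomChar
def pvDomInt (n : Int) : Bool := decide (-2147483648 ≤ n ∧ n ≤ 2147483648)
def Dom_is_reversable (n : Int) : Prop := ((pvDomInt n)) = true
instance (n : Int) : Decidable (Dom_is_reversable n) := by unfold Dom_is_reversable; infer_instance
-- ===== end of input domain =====

-- B replaces A's simulated column-by-column addition-with-carry by computing the real
-- sum n + reverse(n) and scanning that sum's digits for parity (objective: simpler).

-- termination helper for the ports' `while` loops (cited by decreasing_by)
theorem pv_fdiv10_lt (n : Int) (h : 0 < n) : (PySem.Int.floordiv n 10).toNat < n.toNat := by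
  rw [PySem.Int.floordiv_eq_ediv_of_pos (by norm_num)]
  omega

-- ===== PORT A =====
-- `while n:` — guarded by positivity for totality; for negative n Python's loop never
-- terminates (those inputs are outside Pre_), and on Pre_ the guards agree.
def getDigits (n : Int) : List Int :=
  if h : 0 < n then PySem.Int.mod n 10 :: getDigits (PySem.Int.floordiv n 10) else []
termination_by n.toNat
decreasing_by exact pv_fdiv10_lt n h

-- the `for i in range(len(digits))` loop, as index recursion; in-range indexing via getD
def aLoopIdx (ds : List Int) (i : Nat) (carry : Int) : Bool :=
  if h : i < ds.length then
    let v := ds.getD i 0 + ds.getD (ds.length - i - 1) 0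
    if PySem.Int.mod (v + carry) 2 == 0 then false
    else aLoopIdx ds (i + 1) (if v ≥ 10 then (1 : Int) else 0)
  else true
termination_by ds.length - i

def is_reversable (n : Int) : Bool := aLoopIdx (getDigits n) 0 0

-- ===== PORT B =====
-- first `while m:` of Source B (guarded by positivity for totality, as in port A)
def revAcc (m r : Int) : Int :=
  if h : 0 < m then revAcc (PySem.Int.floordiv m 10) (r * 10 + PySem.Int.mod m 10) else r
termination_by m.toNat
decreasing_by exact pv_fdiv10_lt m h

-- second `while s:` of Source B
def bLoop (s : Int) : Bool :=
  if h : 0 < s then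
    if PySem.Int.mod s 2 == 0 then false else bLoop (PySem.Int.floordiv s 10)
  else true
termination_by s.toNat
decreasing_by exact pv_fdiv10_lt s h

def is_reversable_alt (n : Int) : Bool := bLoop (n + revAcc n 0)

-- ===== PRECONDITION & SPEC =====
-- Pre_ excludes negative n, on which both Pythons' `while` loops never terminate (floor division stalls).
def Pre_is_reversable (n : Int) : Prop := 0 ≤ n
instance (n : Int) : Decidable (Pre_is_reversable n) := by unfold Pre_is_reversable; infer_instance

def pvWitness_is_reversable : Int := 47

def Spec_is_reversable (n : Int) (out : Bool) : Prop := out = is_reversable_alt n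
instance (n : Int) (out : Bool) : Decidable (Spec_is_reversable n out) := by unfold Spec_is_reversable; infer_instance

-- ===== CLAIM (what is proved, stated in full; the proofs are below) =====
def Claim_equal_is_reversable : Prop := ∀ (n : Int), Dom_is_reversable n → Pre_is_reversable n → Spec_is_reversable n (is_reversable n)

-- ===== LEMMAS AND PROOFS =====

-- value of a little-endian digit list
def pvVal : List Int → Int
  | [] => 0
  | d :: t => d + 10 * pvVal t

-- column sums: pvW as bs = pvVal as + pvVal bs when lengths agree
def pvW : List Int → List Int → Int
  | a :: as, b :: bs => a + b + 10 * pvW as bs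
  | _, _ => 0

-- A's loop rephrased on the digit list paired with its reverse
def pvLoop2 : List Int → List Int → Int → Bool
  | a :: as, b :: bs, c =>
    if PySem.Int.mod (a + b + c) 2 == 0 then false
    else pvLoop2 as bs (if a + b ≥ 10 then (1 : Int) else 0)
  | _, _, _ => true

theorem bLoop_nonpos (s : Int) (h : ¬ 0 < s) : bLoop s = true := by
  rw [bLoop]; simp [h]

theorem bLoop_pos (s : Int) (h : 0 < s) :
    bLoop s = if PySem.Int.mod s 2 == 0 then false else bLoop (PySem.Int.floordiv s 10) := by
  rw [bLoop]; simp [h]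

theorem getDigits_nonpos (n : Int) (h : ¬ 0 < n) : getDigits n = [] := by
  rw [getDigits]; simp [h]

theorem getDigits_pos (n : Int) (h : 0 < n) :
    getDigits n = PySem.Int.mod n 10 :: getDigits (PySem.Int.floordiv n 10) := by
  rw [getDigits]; simp [h]

theorem getDigits_bounds (n : Int) : ∀ d ∈ getDigits n, 0 ≤ d ∧ d ≤ 9 := by
  induction n using getDigits.induct with
  | case1 n h ih =>
    rw [getDigits_pos n h]
    intro d hd
    rcases List.mem_cons.1 hd with h1 | h1
    · subst h1
      rw [PySem.Int.mod_eq_emod_of_pos (by norm_num)]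
      omega
    · exact ih d h1
  | case2 n h => rw [getDigits_nonpos n h]; simp

theorem pvVal_getDigits (n : Int) (hn : 0 ≤ n) : pvVal (getDigits n) = n := by
  induction n using getDigits.induct with
  | case1 n h ih =>
    have hfd : PySem.Int.floordiv n 10 = n / 10 := PySem.Int.floordiv_eq_ediv_of_pos (by norm_num)
    have hmd : PySem.Int.mod n 10 = n % 10 := PySem.Int.mod_eq_emod_of_pos (by norm_num)
    rw [getDigits_pos n h, pvVal, ih (by rw [hfd]; omega), hmd, hfd]
    omega
  | case2 n h => rw [getDigits_nonpos n h]; simp [pvVal]; omega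

theorem pvLastD_irrel (l : List Int) (a b : Int) (h : l ≠ []) : l.getLastD a = l.getLastD b := by
  cases l with
  | nil => exact absurd rfl h
  | cons x xs => rw [List.getLastD_cons, List.getLastD_cons]

theorem pvW_nil (bs : List Int) : pvW [] bs = 0 := by cases bs <;> rfl

theorem pvLoop2_nil (bs : List Int) (c : Int) : pvLoop2 [] bs c = true := by cases bs <;> rfl

theorem pvLoop2_cons (a b c : Int) (as bs : List Int) :
    pvLoop2 (a :: as) (b :: bs) c =
      if PySem.Int.mod (a + b + c) 2 == 0 then false
      else pvLoop2 as bs (if a + b ≥ 10 then (1 : Int) else 0) := rfl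

theorem getDigits_getLastD (n : Int) (h : 0 < n) : 1 ≤ (getDigits n).getLastD 0 := by
  induction n using getDigits.induct with
  | case1 n h0 ih =>
    rw [getDigits_pos n h0, List.getLastD_cons]
    by_cases hq : 0 < PySem.Int.floordiv n 10
    · have hne : getDigits (PySem.Int.floordiv n 10) ≠ [] := by
        rw [getDigits_pos _ hq]; simp
      rw [pvLastD_irrel _ _ 0 hne]
      exact ih hq
    · rw [getDigits_nonpos _ hq]
      rw [PySem.Int.floordiv_eq_ediv_of_pos (by norm_num)] at hq
      rw [PySem.Int.mod_eq_emod_of_pos (by norm_num)]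
      simp only [List.getLastD]
      omega
  | case2 n h0 => exact absurd h h0

theorem pvVal_append_single (xs : List Int) (d : Int) :
    pvVal (xs ++ [d]) = pvVal xs + d * 10 ^ xs.length := by
  induction xs with
  | nil => simp [pvVal]
  | cons x t ih => simp [pvVal, ih, List.length_cons]; ring

theorem revAcc_eq (m : Int) : ∀ r : Int,
    revAcc m r = r * 10 ^ (getDigits m).length + pvVal (getDigits m).reverse := by
  induction m using getDigits.induct with
  | case1 m h ih =>
    intro r
    rw [revAcc]; simp only [h, dif_pos]
    rw [ih, getDigits_pos m h]
    simp only [List.reverse_cons, pvVal_append_single, List.length_cons, List.length_reverse]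
    ring
  | case2 m h =>
    intro r
    rw [revAcc]; simp only [h, dif_neg, not_false_iff]
    rw [getDigits_nonpos m h]
    simp [pvVal]

theorem pvW_eq (as : List Int) : ∀ bs : List Int, as.length = bs.length →
    pvW as bs = pvVal as + pvVal bs := by
  induction as with
  | nil => intro bs h; cases bs with
    | nil => simp [pvW, pvVal]
    | cons b bs => simp at h
  | cons a t ih =>
    intro bs h
    cases bs with
    | nil => simp at h
    | cons b bs =>
      simp only [List.length_cons, Nat.add_right_cancel_iff] at h
      rw [pvW, pvVal, pvVal, ih bs h]; ring

theorem pvW_nonneg (as : List Int) : ∀ bs : List Int,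
    (∀ a ∈ as, 0 ≤ a) → (∀ b ∈ bs, 0 ≤ b) → 0 ≤ pvW as bs := by
  induction as with
  | nil => intro bs _ _; rw [pvW_nil]
  | cons a t ih =>
    intro bs ha hb
    cases bs with
    | nil => show (0:Int) ≤ 0; omega
    | cons b bs =>
      have h1 := ha a (by simp)
      have h2 := hb b (by simp)
      have h3 := ih bs (fun x hx => ha x (by simp [hx])) (fun x hx => hb x (by simp [hx]))
      rw [pvW]; omega

theorem pvW_pos (as : List Int) : ∀ bs : List Int, as.length = bs.length → as ≠ [] →
    (∀ a ∈ as, 0 ≤ a) → (∀ b ∈ bs, 0 ≤ b) → 1 ≤ as.getLastD 0 → 0 < pvW as bs := by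
  induction as with
  | nil => intro bs _ hne _ _ _; exact absurd rfl hne
  | cons a t ih =>
    intro bs hlen _ ha hb hlast
    cases bs with
    | nil => simp at hlen
    | cons b bs =>
      simp only [List.length_cons, Nat.add_right_cancel_iff] at hlen
      have h2 := hb b (by simp)
      rw [pvW]
      cases t with
      | nil =>
        rw [List.getLastD_cons] at hlast
        simp only [List.getLastD] at hlast
        cases bs with
        | nil => rw [pvW_nil]; omega
        | cons c cs => simp at hlen
      | cons x xs =>
        have hlast' : 1 ≤ (x :: xs).getLastD 0 := by
          rw [List.getLastD_cons] at hlast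
          rwa [pvLastD_irrel _ a 0 (by simp)] at hlast
        have h3 := ih bs hlen (by simp) (fun y hy => ha y (by simp [hy]))
          (fun y hy => hb y (by simp [hy])) hlast'
        have h1 := ha a (by simp)
        omega

-- main invariant: A's column loop equals B's digit scan of (carry + column value)
theorem pvLoop2_eq_bLoop (as : List Int) : ∀ (bs : List Int) (c : Int),
    as.length = bs.length →
    (∀ a ∈ as, 0 ≤ a ∧ a ≤ 9) → (∀ b ∈ bs, 0 ≤ b ∧ b ≤ 9) →
    (as = [] ∨ 1 ≤ as.getLastD 0) → (c = 0 ∨ c = 1) →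
    pvLoop2 as bs c = bLoop (c + pvW as bs) := by
  induction as with
  | nil =>
    intro bs c hlen _ _ _ hc
    cases bs with
    | cons b bs => simp at hlen
    | nil =>
      rw [pvW_nil]
      rcases hc with hc | hc <;> subst hc
      · rw [pvLoop2_nil, bLoop_nonpos _ (by norm_num)]
      · rw [pvLoop2_nil, bLoop_pos _ (by norm_num)]
        rw [PySem.Int.mod_eq_emod_of_pos (by norm_num),
          PySem.Int.floordiv_eq_ediv_of_pos (by norm_num)]
        norm_num
        rw [bLoop_nonpos _ (by norm_num)]
  | cons a t ih =>
    intro bs c hlen ha hb hlast hc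
    cases bs with
    | nil => simp at hlen
    | cons b bs =>
      simp only [List.length_cons, Nat.add_right_cancel_iff] at hlen
      have ha0 := ha a (by simp)
      have hb0 := hb b (by simp)
      have hat : ∀ x ∈ t, 0 ≤ x ∧ x ≤ 9 := fun x hx => ha x (by simp [hx])
      have hbt : ∀ x ∈ bs, 0 ≤ x ∧ x ≤ 9 := fun x hx => hb x (by simp [hx])
      have hWnn : 0 ≤ pvW t bs :=
        pvW_nonneg t bs (fun x hx => (hat x hx).1) (fun x hx => (hbt x hx).1)
      have hSpos : 0 < c + pvW (a :: t) (b :: bs) := by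
        rcases hlast with h | h
        · simp at h
        · cases t with
          | nil =>
            rw [List.getLastD_cons] at h
            simp only [List.getLastD] at h
            cases bs with
            | nil => rw [pvW, pvW_nil]; omega
            | cons c' cs => simp at hlen
          | cons x xs =>
            have hlast' : 1 ≤ (x :: xs).getLastD 0 := by
              rw [List.getLastD_cons] at h
              rwa [pvLastD_irrel _ a 0 (by simp)] at h
            have := pvW_pos (x :: xs) bs hlen (by simp)
              (fun y hy => (hat y hy).1) (fun y hy => (hbt y hy).1) hlast'
            rw [pvW]; omega
      rw [pvLoop2, pvW]
      rw [bLoop_pos _ (by rw [pvW] at hSpos; exact hSpos)]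
      rw [PySem.Int.mod_eq_emod_of_pos (by norm_num),
        PySem.Int.mod_eq_emod_of_pos (by norm_num),
        PySem.Int.floordiv_eq_ediv_of_pos (by norm_num)]
      have hpar : (a + b + c) % 2 = (c + (a + b + 10 * pvW t bs)) % 2 := by omega
      by_cases he : (a + b + c) % 2 = 0
      · simp [he, ← hpar]
      · have he' : ¬ (c + (a + b + 10 * pvW t bs)) % 2 = 0 := by omega
        simp only [he, he', beq_iff_eq, if_false]
        have hdiv : (c + (a + b + 10 * pvW t bs)) / 10
            = (if a + b ≥ 10 then (1 : Int) else 0) + pvW t bs := by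
          split_ifs with h10 <;> omega
        rw [hdiv]
        have hlast'' : t = [] ∨ 1 ≤ t.getLastD 0 := by
          cases t with
          | nil => exact Or.inl rfl
          | cons x xs =>
            rcases hlast with h | h
            · simp at h
            · rw [List.getLastD_cons] at h
              rw [pvLastD_irrel _ a 0 (by simp)] at h
              exact Or.inr h
        exact ih bs _ hlen hat hbt hlast'' (by split_ifs <;> simp)

-- A's indexed loop equals the two-list loop on (drop i ds, drop i ds.reverse)
theorem aLoopIdx_eq_pvLoop2 (ds : List Int) : ∀ (i : Nat) (c : Int),
    aLoopIdx ds i c = pvLoop2 (ds.drop i) (ds.reverse.drop i) c := by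
  suffices hs : ∀ (k i : Nat) (c : Int), ds.length - i = k →
      aLoopIdx ds i c = pvLoop2 (ds.drop i) (ds.reverse.drop i) c by
    intro i c; exact hs (ds.length - i) i c rfl
  intro k
  induction k using Nat.strong_induction_on with
  | _ k ih =>
    intro i c hk
    by_cases h : i < ds.length
    · have hdrop : ds.drop i = ds[i] :: ds.drop (i + 1) := List.drop_eq_getElem_cons h
      have hr : i < ds.reverse.length := by simpa using h
      have hdropr : ds.reverse.drop i = ds.reverse[i] :: ds.reverse.drop (i + 1) :=
        List.drop_eq_getElem_cons hr
      have hgr : ds.reverse[i] = ds[ds.length - 1 - i] := List.getElem_reverse hr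
      have hg1 : ds.getD i 0 = ds[i] := List.getD_eq_getElem ds 0 h
      have hg2 : ds.getD (ds.length - i - 1) 0 = ds[ds.length - 1 - i] := by
        have heq : ds.length - i - 1 = ds.length - 1 - i := by omega
        rw [heq]; exact List.getD_eq_getElem ds 0 (by omega)
      rw [aLoopIdx]
      simp only [h, dif_pos]
      rw [hdrop, hdropr, pvLoop2_cons, hg1, hg2, hgr,
        ih (ds.length - (i + 1)) (by omega) (i + 1) _ rfl]
    · rw [aLoopIdx]
      simp only [h, dif_neg, not_false_iff]
      rw [List.drop_eq_nil_of_le (by omega), pvLoop2_nil]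

-- ===== VERDICT (by name: the statement is the Claim_ definition above) =====
theorem is_reversable_spec : Claim_equal_is_reversable := by
  intro n _ hpre
  unfold Spec_is_reversable is_reversable is_reversable_alt
  rw [aLoopIdx_eq_pvLoop2]
  simp only [List.drop_zero]
  have hb : ∀ b ∈ (getDigits n).reverse, 0 ≤ b ∧ b ≤ 9 := by
    intro b hbm; exact getDigits_bounds n b (List.mem_reverse.1 hbm)
  have hlast : getDigits n = [] ∨ 1 ≤ (getDigits n).getLastD 0 := by
    by_cases h0 : 0 < n
    · exact Or.inr (getDigits_getLastD n h0)
    · exact Or.inl (getDigits_nonpos n h0)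
  rw [pvLoop2_eq_bLoop (getDigits n) (getDigits n).reverse 0
    (by simp) (getDigits_bounds n) hb hlast (Or.inl rfl)]
  rw [pvW_eq _ _ (by simp)]
  rw [revAcc_eq n 0]
  rw [pvVal_getDigits n hpre]
  norm_num
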